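-- pv_equiv track=rewrite | github.com/mario33881/file2npp_macro | file2npp_macro/file2npp_macro.py | key_to_code
-- ===== SOURCE A (Python) =====
-- import string
--
-- digits_ascii = [c for c in string.digits + string.ascii_lowercase]
--
-- valid_keys = [
--         {"key": "backspace", "code": 8},
--         {"key": "tab", "code": 9},
--         {"key": "enter", "code": 13},
--         {"key": "esc", "code": 27},
--         {"key": "spacebar", "code": 32},
--         {"key": "page_up", "code": 33},
--         {"key": "page_down", "code": 34},
--         {"key": "end", "code": 35},
--         {"key": "home", "code": 36},
--         {"key": "left", "code": 37},
--         {"key": "up", "code": 38},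
--         {"key": "right", "code": 39},
--         {"key": "down", "code": 40},
--         {"key": "ins", "code": 45},
--         {"key": "del", "code": 46},
--         {"key": "numpad_0", "code": 96},
--         {"key": "numpad_1", "code": 97},
--         {"key": "numpad_2", "code": 98},
--         {"key": "numpad_3", "code": 99},
--         {"key": "numpad_4", "code": 100},
--         {"key": "numpad_5", "code": 101},
--         {"key": "numpad_6", "code": 102},
--         {"key": "numpad_7", "code": 103},
--         {"key": "numpad_8", "code": 104},
--         {"key": "numpad_9", "code": 105},
--
--         {"key": "num_*", "code": -2},
--         {"key": "num_+", "code": -2},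
--         {"key": "num_-", "code": -2},
--         {"key": "num_.", "code": -2},
--         {"key": "num_/", "code": -2},
--
--         {"key": "f1", "code": 112},
--         {"key": "f2", "code": 113},
--         {"key": "f3", "code": 114},
--         {"key": "f4", "code": 115},
--         {"key": "f5", "code": 116},
--         {"key": "f6", "code": 117},
--         {"key": "f7", "code": 118},
--         {"key": "f8", "code": 119},
--         {"key": "f9", "code": 120},
--         {"key": "f10", "code": 121},
--         {"key": "f11", "code": 122},
--         {"key": "f12", "code": 123},
--
--         {"key": "~", "code": -2},
--         {"key": "-", "code": -2},
--         {"key": "=", "code": -2},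
--         {"key": "[", "code": -2},
--         {"key": "]", "code": -2},
--         {"key": ";", "code": -2},
--         {"key": "'", "code": -2},
--         {"key": "\\", "code": -2},
--         {"key": ",", "code": -2},
--         {"key": ".", "code": -2},
--         {"key": "/", "code": -2},
--         {"key": "<>", "code": -2},
--         ]
--
-- def key_to_code(t_key):
--     """
--     Converts a key to the corresponding code
--     for notepad++ hotkey.
--
--     :param str t_key: hotkey
--     :return int code: hotkey key code
--     """
--     code = -1
--     i = 0
--
--     while code < 0 and i < len(valid_keys):
--         if valid_keys[i]["key"] == t_key.lower().replace(" ", "_"):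
--             code = valid_keys[i]["code"]
--         else:
--             if t_key in digits_ascii:
--                 code = ord(t_key)
--         i += 1
--
--     return code
-- ===== SOURCE B (Python) =====
-- import string
--
-- digits_ascii = [c for c in string.digits + string.ascii_lowercase]
--
-- named_codes = {
--     "backspace": 8, "tab": 9, "enter": 13, "esc": 27, "spacebar": 32,
--     "page_up": 33, "page_down": 34, "end": 35, "home": 36, "left": 37,
--     "up": 38, "right": 39, "down": 40, "ins": 45, "del": 46,
-- }
--
-- no_code_keys = {
--     "num_*", "num_+", "num_-", "num_.", "num_/",
--     "~", "-", "=", "[", "]", ";", "'", "\\", ",", ".", "/", "<>",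
-- }
--
-- def key_to_code(t_key):
--     norm = t_key.lower().replace(" ", "_")
--     if norm in named_codes:
--         return named_codes[norm]
--     d = norm[7:]
--     if norm.startswith("numpad_") and len(d) == 1 and 48 <= ord(d) <= 57:
--         return 96 + ord(d) - 48
--     r = norm[1:]
--     if norm.startswith("f") and len(r) == 1 and 49 <= ord(r) <= 57:
--         return 111 + ord(r) - 48
--     if norm.startswith("f") and len(r) == 2 and r[0] == "1" and 48 <= ord(r[1]) <= 50:
--         return 121 + ord(r[1]) - 48
--     if norm in no_code_keys:
--         return -2
--     if t_key in digits_ascii: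
--         return ord(t_key)
--     return -1
-- ===== Notes on version B (the rewrite author's own statement) =====
-- stated objective: faster
-- what changed: Replaces A's stateful while-loop scan of the 57-entry table (with its code<0 continuation flag and per-iteration digit check) by a 15-entry named-key dict lookup plus arithmetic decoding of the numpad_<digit> and f1..f12 key families and a small no-code key set, with a digit/letter ord fallback.
import Mathlib
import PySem

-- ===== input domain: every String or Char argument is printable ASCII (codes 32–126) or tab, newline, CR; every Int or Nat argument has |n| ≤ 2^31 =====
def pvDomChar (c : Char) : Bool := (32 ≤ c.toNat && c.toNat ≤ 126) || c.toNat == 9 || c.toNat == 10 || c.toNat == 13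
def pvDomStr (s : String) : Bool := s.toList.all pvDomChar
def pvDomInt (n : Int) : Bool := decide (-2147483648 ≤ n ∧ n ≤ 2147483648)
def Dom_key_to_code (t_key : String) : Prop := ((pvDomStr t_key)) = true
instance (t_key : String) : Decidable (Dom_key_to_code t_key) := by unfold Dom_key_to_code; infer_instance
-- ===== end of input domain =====

-- B replaces A's stateful scan of the 57-entry table by a 15-entry named-key dict plus arithmetic
-- decoding of the numpad_<digit> / f<1..12> families and a small no-code key set (alternative decomposition).

-- shared module-level constant (same in Source A and Source B)
-- digits_ascii = [c for c in string.digits + string.ascii_lowercase]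
def digitsAscii : List String :=
  ["0","1","2","3","4","5","6","7","8","9",
   "a","b","c","d","e","f","g","h","i","j","k","l","m",
   "n","o","p","q","r","s","t","u","v","w","x","y","z"]

-- ord(t_key); in both programs it is only reached when its argument is a single-character string,
-- where this is exactly Python's ord (the [] / multi-char branches are unreachable there).
def pyOrd (s : String) : Int :=
  match s.toList with
  | [c] => (c.toNat : Int)
  | _ => -1

-- ===== PORT A =====
-- valid_keys, as (key, code) pairs
def validKeys : List (String × Int) :=
  [("backspace", 8), ("tab", 9), ("enter", 13), ("esc", 27), ("spacebar", 32),
   ("page_up", 33), ("page_down", 34), ("end", 35), ("home", 36), ("left", 37),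
   ("up", 38), ("right", 39), ("down", 40), ("ins", 45), ("del", 46),
   ("numpad_0", 96), ("numpad_1", 97), ("numpad_2", 98), ("numpad_3", 99),
   ("numpad_4", 100), ("numpad_5", 101), ("numpad_6", 102), ("numpad_7", 103),
   ("numpad_8", 104), ("numpad_9", 105),
   ("num_*", -2), ("num_+", -2), ("num_-", -2), ("num_.", -2), ("num_/", -2),
   ("f1", 112), ("f2", 113), ("f3", 114), ("f4", 115), ("f5", 116), ("f6", 117),
   ("f7", 118), ("f8", 119), ("f9", 120), ("f10", 121), ("f11", 122), ("f12", 123),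
   ("~", -2), ("-", -2), ("=", -2), ("[", -2), ("]", -2), (";", -2), ("'", -2),
   ("\\", -2), (",", -2), (".", -2), ("/", -2), ("<>", -2)]

-- the while loop: while code < 0 and i < len(valid_keys): …
def keyLoopA (t_key : String) : List (String × Int) → Int → Int
  | [], code => code
  | (k, c) :: rest, code =>
    if code < 0 then
      let code' :=
        if k == PySem.Str.replace (PySem.Str.lower t_key) " " "_" then c
        else if t_key ∈ digitsAscii then pyOrd t_key else code
      keyLoopA t_key rest code'
    else code

def key_to_code (t_key : String) : Int :=
  keyLoopA t_key validKeys (-1)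

-- ===== PORT B =====
-- named_codes = {...} (the 15 keys with a real keycode that follow no pattern)
def namedCodes : PySem.Dict String Int :=
  PySem.Dict.mk
    [("backspace", 8), ("tab", 9), ("enter", 13), ("esc", 27), ("spacebar", 32),
     ("page_up", 33), ("page_down", 34), ("end", 35), ("home", 36), ("left", 37),
     ("up", 38), ("right", 39), ("down", 40), ("ins", 45), ("del", 46)]

-- no_code_keys = {...} (keys the table maps to -2)
def noCodeKeys : PySem.Set String :=
  PySem.Set.ofList
    ["num_*", "num_+", "num_-", "num_.", "num_/",
     "~", "-", "=", "[", "]", ";", "'", "\\", ",", ".", "/", "<>"]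

-- ord(s) for the one-character strings B's length guards ensure (the other branch is unreachable there)
def ordOf (s : String) : Int :=
  match s.toList with
  | [c] => (c.toNat : Int)
  | _ => 0

-- ord(r[i]) for the in-range indices B's length guards ensure
def ordAt (r : String) (i : Int) : Int :=
  match PySem.Str.pyGet? r i with
  | some c => (c.toNat : Int)
  | none => 0

-- the four early-return branches of Source B on the normalized key: some code if one fires
def bLookup (norm : String) : Option Int :=
  match namedCodes.get? norm with
  | some c => some c
  | none =>
    -- d = norm[7:], r = norm[1:] of Source B, written inline
    if PySem.Str.startswith norm "numpad_" = true ∧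
        PySem.Str.len (PySem.Str.slice norm (some 7) none) = 1 ∧
        48 ≤ ordOf (PySem.Str.slice norm (some 7) none) ∧
        ordOf (PySem.Str.slice norm (some 7) none) ≤ 57 then
      some (96 + ordOf (PySem.Str.slice norm (some 7) none) - 48)
    else if PySem.Str.startswith norm "f" = true ∧
        PySem.Str.len (PySem.Str.slice norm (some 1) none) = 1 ∧
        49 ≤ ordOf (PySem.Str.slice norm (some 1) none) ∧
        ordOf (PySem.Str.slice norm (some 1) none) ≤ 57 then
      some (111 + ordOf (PySem.Str.slice norm (some 1) none) - 48)
    else if PySem.Str.startswith norm "f" = true ∧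
        PySem.Str.len (PySem.Str.slice norm (some 1) none) = 2 ∧
        PySem.Str.pyGet? (PySem.Str.slice norm (some 1) none) 0 = some '1' ∧
        48 ≤ ordAt (PySem.Str.slice norm (some 1) none) 1 ∧
        ordAt (PySem.Str.slice norm (some 1) none) 1 ≤ 50 then
      some (121 + ordAt (PySem.Str.slice norm (some 1) none) 1 - 48)
    else if PySem.Set.contains noCodeKeys norm = true then
      some (-2)
    else none

def key_to_code_alt (t_key : String) : Int :=
  match bLookup (PySem.Str.replace (PySem.Str.lower t_key) " " "_") with
  | some c => c
  | none => if t_key ∈ digitsAscii then pyOrd t_key else -1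

-- ===== PRECONDITION & SPEC =====
def Spec_key_to_code (t_key : String) (out : Int) : Prop := out = key_to_code_alt t_key
instance (t_key : String) (out : Int) : Decidable (Spec_key_to_code t_key out) := by unfold Spec_key_to_code; infer_instance

-- ===== CLAIM (what is proved, stated in full; the proofs are below) =====
def Claim_equal_key_to_code : Prop := ∀ (t_key : String), Dom_key_to_code t_key → Spec_key_to_code t_key (key_to_code t_key)

-- ===== LEMMAS AND PROOFS =====

-- ---- A-side: the scan is a first-match lookup ----

-- once code ≥ 0 the while condition fails and the loop returns code unchanged
theorem keyLoopA_of_nonneg (t : String) (ks : List (String × Int)) (code : Int)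
    (h : 0 ≤ code) : keyLoopA t ks code = code := by
  cases ks with
  | nil => rfl
  | cons p rest => cases p; simp [keyLoopA, show ¬ code < 0 by omega]

-- if t is not a digit/lowercase letter and no remaining key matches, the loop is the identity
theorem keyLoopA_const (t : String) (hd : t ∉ digitsAscii) :
    ∀ (ks : List (String × Int)) (code : Int),
      (∀ p ∈ ks, p.1 ≠ PySem.Str.replace (PySem.Str.lower t) " " "_") →
      keyLoopA t ks code = code := by
  intro ks
  induction ks with
  | nil => intro code _; rfl
  | cons p rest ih =>
    intro code hno
    obtain ⟨k, c⟩ := p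
    have hk : k ≠ PySem.Str.replace (PySem.Str.lower t) " " "_" :=
      hno (k, c) (List.mem_cons_self ..)
    by_cases hneg : code < 0
    · have h1 : keyLoopA t ((k, c) :: rest) code = keyLoopA t rest code := by
        simp [keyLoopA, hneg, hk, hd]
      rw [h1]
      exact ih code (fun p hp => hno p (List.mem_cons_of_mem _ hp))
    · simp [keyLoopA, hneg]

-- for a non-digit input the scan computes the first-match lookup (keys assumed distinct)
theorem keyLoopA_lookup (t : String) (hd : t ∉ digitsAscii) :
    ∀ (ks : List (String × Int)),
      (ks.map Prod.fst).Nodup →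
      keyLoopA t ks (-1) =
        (match (PySem.Dict.mk ks).get? (PySem.Str.replace (PySem.Str.lower t) " " "_") with
         | some c => c
         | none => -1) := by
  intro ks
  induction ks with
  | nil => intro _; rfl
  | cons p rest ih =>
    intro hnd
    obtain ⟨k, c⟩ := p
    simp only [List.map_cons, List.nodup_cons] at hnd
    obtain ⟨hk_notin, hnd'⟩ := hnd
    by_cases hk : k = PySem.Str.replace (PySem.Str.lower t) " " "_"
    · have h1 : keyLoopA t ((k, c) :: rest) (-1) = keyLoopA t rest c := by
        simp [keyLoopA, hk]
      have h2 : (PySem.Dict.mk ((k, c) :: rest)).get?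
          (PySem.Str.replace (PySem.Str.lower t) " " "_") = some c := by
        simp [PySem.Dict.get?_mk_cons, hk]
      rw [h1, h2]
      by_cases hc : 0 ≤ c
      · exact keyLoopA_of_nonneg t rest c hc
      · refine keyLoopA_const t hd rest c ?_
        intro q hq hq1
        have hm : q.1 ∈ rest.map Prod.fst := List.mem_map_of_mem hq
        rw [hq1, ← hk] at hm
        exact hk_notin hm
    · have h1 : keyLoopA t ((k, c) :: rest) (-1) = keyLoopA t rest (-1) := by
        simp [keyLoopA, hk, hd]
      have h2 : (PySem.Dict.mk ((k, c) :: rest)).get?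
          (PySem.Str.replace (PySem.Str.lower t) " " "_") =
          (PySem.Dict.mk rest).get? (PySem.Str.replace (PySem.Str.lower t) " " "_") := by
        simp [PySem.Dict.get?_mk_cons, hk]
      rw [h1, h2]
      exact ih hnd'

theorem validKeys_nodup : (validKeys.map Prod.fst).Nodup := by decide

-- ---- B-side: shape facts ----

-- a first-match hit in a literal dict names one of its pairs
theorem get?_mk_mem {κ ν : Type} [BEq κ] [LawfulBEq κ] (l : List (κ × ν)) (k : κ) (v : ν)
    (h : (PySem.Dict.mk l).get? k = some v) : (k, v) ∈ l := by
  induction l with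
  | nil => simp [PySem.Dict.get?] at h
  | cons p rest ih =>
    obtain ⟨k', v'⟩ := p
    rw [PySem.Dict.get?_mk_cons] at h
    by_cases hk : (k' == k) = true
    · rw [if_pos hk] at h; obtain rfl := eq_of_beq hk; injection h with h; subst h
      exact List.mem_cons_self ..
    · rw [if_neg hk] at h; exact List.mem_cons_of_mem _ (ih h)

theorem slice_toList (s : String) (n : Nat) :
    (PySem.Str.slice s (some (n : Int)) none).toList = s.toList.drop n := by
  rw [PySem.Str.toList_slice, PySem.Chars.slice_eq_listSlice,
     PySem.List.slice_from _ (by positivity)]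
  simp

theorem char_of_toNat {c d : Char} (h : c.toNat = d.toNat) : c = d :=
  Char.ext (UInt32.toNat_inj.mp h)

theorem ordOf_toList {s : String} {c : Char} (h : s.toList = [c]) :
    ordOf s = (c.toNat : Int) := by unfold ordOf; rw [h]

-- the numpad branch fires exactly on the ten numpad_<digit> strings
theorem numpad_cases (s : String)
    (h1 : PySem.Str.startswith s "numpad_" = true)
    (h2 : PySem.Str.len (PySem.Str.slice s (some 7) none) = 1)
    (h3 : 48 ≤ ordOf (PySem.Str.slice s (some 7) none))
    (h4 : ordOf (PySem.Str.slice s (some 7) none) ≤ 57) :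
    s = "numpad_0" ∨ s = "numpad_1" ∨ s = "numpad_2" ∨ s = "numpad_3" ∨ s = "numpad_4" ∨
    s = "numpad_5" ∨ s = "numpad_6" ∨ s = "numpad_7" ∨ s = "numpad_8" ∨ s = "numpad_9" := by
  rw [PySem.Str.startswith_eq, PySem.Chars.startswith_iff] at h1
  obtain ⟨t, ht⟩ := h1
  have hd7 : (PySem.Str.slice s (some 7) none).toList = t := by
    rw [show ((7 : Int) = ((7 : Nat) : Int)) from rfl, slice_toList, ← ht,
       show (7 : Nat) = ("numpad_".toList).length from rfl]
    exact List.drop_left ..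
  rw [PySem.Str.len_eq, hd7] at h2
  have hlen : t.length = 1 := by omega
  obtain ⟨c, rfl⟩ : ∃ c, t = [c] := by
    match t, hlen with | [c], _ => exact ⟨c, rfl⟩
  rw [ordOf_toList hd7] at h3 h4
  have hc : c.toNat = 48 ∨ c.toNat = 49 ∨ c.toNat = 50 ∨ c.toNat = 51 ∨ c.toNat = 52 ∨
      c.toNat = 53 ∨ c.toNat = 54 ∨ c.toNat = 55 ∨ c.toNat = 56 ∨ c.toNat = 57 := by omega
  have hs : ∀ u : String, s.toList = u.toList → s = u := fun _ h => String.toList_inj.mp h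
  rcases hc with h|h|h|h|h|h|h|h|h|h <;>
    [ exact Or.inl (hs _ (by rw [← ht, char_of_toNat (d := '0') h]; decide));
      exact Or.inr (Or.inl (hs _ (by rw [← ht, char_of_toNat (d := '1') h]; decide)));
      exact Or.inr (Or.inr (Or.inl (hs _ (by rw [← ht, char_of_toNat (d := '2') h]; decide))));
      exact Or.inr (Or.inr (Or.inr (Or.inl (hs _ (by rw [← ht, char_of_toNat (d := '3') h]; decide)))));
      exact Or.inr (Or.inr (Or.inr (Or.inr (Or.inl (hs _ (by rw [← ht, char_of_toNat (d := '4') h]; decide))))));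
      exact Or.inr (Or.inr (Or.inr (Or.inr (Or.inr (Or.inl (hs _ (by rw [← ht, char_of_toNat (d := '5') h]; decide)))))));
      exact Or.inr (Or.inr (Or.inr (Or.inr (Or.inr (Or.inr (Or.inl (hs _ (by rw [← ht, char_of_toNat (d := '6') h]; decide))))))));
      exact Or.inr (Or.inr (Or.inr (Or.inr (Or.inr (Or.inr (Or.inr (Or.inl (hs _ (by rw [← ht, char_of_toNat (d := '7') h]; decide)))))))));
      exact Or.inr (Or.inr (Or.inr (Or.inr (Or.inr (Or.inr (Or.inr (Or.inr (Or.inl (hs _ (by rw [← ht, char_of_toNat (d := '8') h]; decide))))))))));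
      exact Or.inr (Or.inr (Or.inr (Or.inr (Or.inr (Or.inr (Or.inr (Or.inr (Or.inr (hs _ (by rw [← ht, char_of_toNat (d := '9') h]; decide))))))))))]

-- the one-digit f branch fires exactly on f1..f9
theorem f1_cases (s : String)
    (h1 : PySem.Str.startswith s "f" = true)
    (h2 : PySem.Str.len (PySem.Str.slice s (some 1) none) = 1)
    (h3 : 49 ≤ ordOf (PySem.Str.slice s (some 1) none))
    (h4 : ordOf (PySem.Str.slice s (some 1) none) ≤ 57) :
    s = "f1" ∨ s = "f2" ∨ s = "f3" ∨ s = "f4" ∨ s = "f5" ∨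
    s = "f6" ∨ s = "f7" ∨ s = "f8" ∨ s = "f9" := by
  rw [PySem.Str.startswith_eq, PySem.Chars.startswith_iff] at h1
  obtain ⟨t, ht⟩ := h1
  have hd1 : (PySem.Str.slice s (some 1) none).toList = t := by
    rw [show ((1 : Int) = ((1 : Nat) : Int)) from rfl, slice_toList, ← ht,
       show (1 : Nat) = ("f".toList).length from rfl]
    exact List.drop_left ..
  rw [PySem.Str.len_eq, hd1] at h2
  have hlen : t.length = 1 := by omega
  obtain ⟨c, rfl⟩ : ∃ c, t = [c] := by
    match t, hlen with | [c], _ => exact ⟨c, rfl⟩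
  rw [ordOf_toList hd1] at h3 h4
  have hc : c.toNat = 49 ∨ c.toNat = 50 ∨ c.toNat = 51 ∨ c.toNat = 52 ∨
      c.toNat = 53 ∨ c.toNat = 54 ∨ c.toNat = 55 ∨ c.toNat = 56 ∨ c.toNat = 57 := by omega
  have hs : ∀ u : String, s.toList = u.toList → s = u := fun _ h => String.toList_inj.mp h
  rcases hc with h|h|h|h|h|h|h|h|h <;>
    [ exact Or.inl (hs _ (by rw [← ht, char_of_toNat (d := '1') h]; decide));
      exact Or.inr (Or.inl (hs _ (by rw [← ht, char_of_toNat (d := '2') h]; decide)));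
      exact Or.inr (Or.inr (Or.inl (hs _ (by rw [← ht, char_of_toNat (d := '3') h]; decide))));
      exact Or.inr (Or.inr (Or.inr (Or.inl (hs _ (by rw [← ht, char_of_toNat (d := '4') h]; decide)))));
      exact Or.inr (Or.inr (Or.inr (Or.inr (Or.inl (hs _ (by rw [← ht, char_of_toNat (d := '5') h]; decide))))));
      exact Or.inr (Or.inr (Or.inr (Or.inr (Or.inr (Or.inl (hs _ (by rw [← ht, char_of_toNat (d := '6') h]; decide)))))));
      exact Or.inr (Or.inr (Or.inr (Or.inr (Or.inr (Or.inr (Or.inl (hs _ (by rw [← ht, char_of_toNat (d := '7') h]; decide))))))));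
      exact Or.inr (Or.inr (Or.inr (Or.inr (Or.inr (Or.inr (Or.inr (Or.inl (hs _ (by rw [← ht, char_of_toNat (d := '8') h]; decide)))))))));
      exact Or.inr (Or.inr (Or.inr (Or.inr (Or.inr (Or.inr (Or.inr (Or.inr (hs _ (by rw [← ht, char_of_toNat (d := '9') h]; decide)))))))))]

-- the two-digit f branch fires exactly on f10..f12
theorem f2_cases (s : String)
    (h1 : PySem.Str.startswith s "f" = true)
    (h2 : PySem.Str.len (PySem.Str.slice s (some 1) none) = 2)
    (h3 : PySem.Str.pyGet? (PySem.Str.slice s (some 1) none) 0 = some '1')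
    (h4 : 48 ≤ ordAt (PySem.Str.slice s (some 1) none) 1)
    (h5 : ordAt (PySem.Str.slice s (some 1) none) 1 ≤ 50) :
    s = "f10" ∨ s = "f11" ∨ s = "f12" := by
  rw [PySem.Str.startswith_eq, PySem.Chars.startswith_iff] at h1
  obtain ⟨t, ht⟩ := h1
  have hd1 : (PySem.Str.slice s (some 1) none).toList = t := by
    rw [show ((1 : Int) = ((1 : Nat) : Int)) from rfl, slice_toList, ← ht,
       show (1 : Nat) = ("f".toList).length from rfl]
    exact List.drop_left ..
  rw [PySem.Str.len_eq, hd1] at h2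
  have hlen : t.length = 2 := by omega
  obtain ⟨c0, c1, rfl⟩ : ∃ c0 c1, t = [c0, c1] := by
    match t, hlen with | [c0, c1], _ => exact ⟨c0, c1, rfl⟩
  have hg0 : PySem.Str.pyGet? (PySem.Str.slice s (some 1) none) 0 = some c0 := by
    rw [show ((0 : Int) = ((0 : Nat) : Int)) from rfl, PySem.Str.pyGet?_natCast, hd1]; rfl
  rw [hg0] at h3
  injection h3 with h3
  subst h3
  have hg1 : ordAt (PySem.Str.slice s (some 1) none) 1 = (c1.toNat : Int) := by
    unfold ordAt
    rw [show ((1 : Int) = ((1 : Nat) : Int)) from rfl, PySem.Str.pyGet?_natCast,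
        show (((1 : Nat) : Int)) = (1 : Int) from rfl, hd1]
    rfl
  rw [hg1] at h4 h5
  have hc : c1.toNat = 48 ∨ c1.toNat = 49 ∨ c1.toNat = 50 := by omega
  have hs : ∀ u : String, s.toList = u.toList → s = u := fun _ h => String.toList_inj.mp h
  rcases hc with h|h|h <;>
    [ exact Or.inl (hs _ (by rw [← ht, char_of_toNat (d := '0') h]; decide));
      exact Or.inr (Or.inl (hs _ (by rw [← ht, char_of_toNat (d := '1') h]; decide)));
      exact Or.inr (Or.inr (hs _ (by rw [← ht, char_of_toNat (d := '2') h]; decide)))]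

-- ---- the central fact: B's branch chain IS a first-match lookup in A's table ----
set_option maxRecDepth 16384 in
set_option maxHeartbeats 2000000 in
theorem bLookup_eq (s : String) : bLookup s = (PySem.Dict.mk validKeys).get? s := by
  unfold bLookup
  cases hn : namedCodes.get? s with
  | some c =>
    have hm := get?_mk_mem _ _ _ hn
    simp only [List.mem_cons, Prod.mk.injEq, List.not_mem_nil, or_false] at hm
    rcases hm with ⟨rfl,rfl⟩|⟨rfl,rfl⟩|⟨rfl,rfl⟩|⟨rfl,rfl⟩|⟨rfl,rfl⟩|⟨rfl,rfl⟩|⟨rfl,rfl⟩|⟨rfl,rfl⟩|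
      ⟨rfl,rfl⟩|⟨rfl,rfl⟩|⟨rfl,rfl⟩|⟨rfl,rfl⟩|⟨rfl,rfl⟩|⟨rfl,rfl⟩|⟨rfl,rfl⟩ <;> decide
  | none =>
    split_ifs with h1 h2 h3 h4
    · obtain ⟨ha, hb, hc, hd⟩ := h1
      rcases numpad_cases s ha hb hc hd with rfl|rfl|rfl|rfl|rfl|rfl|rfl|rfl|rfl|rfl <;> decide
    · obtain ⟨ha, hb, hc, hd⟩ := h2
      rcases f1_cases s ha hb hc hd with rfl|rfl|rfl|rfl|rfl|rfl|rfl|rfl|rfl <;> decide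
    · obtain ⟨ha, hb, hc, hd, he⟩ := h3
      rcases f2_cases s ha hb hc hd he with rfl|rfl|rfl <;> decide
    · have hm : s ∈ ["num_*", "num_+", "num_-", "num_.", "num_/",
           "~", "-", "=", "[", "]", ";", "'", "\\", ",", ".", "/", "<>"] := by
        have h' : s ∈ noCodeKeys := by simpa [PySem.Set.contains] using h4
        unfold noCodeKeys at h'
        rw [PySem.Set.mem_ofList] at h'
        exact h'
      simp only [List.mem_cons, List.not_mem_nil, or_false] at hm
      rcases hm with rfl|rfl|rfl|rfl|rfl|rfl|rfl|rfl|rfl|rfl|rfl|rfl|rfl|rfl|rfl|rfl|rfl <;> decide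
    · cases hv : (PySem.Dict.mk validKeys).get? s with
      | none => rfl
      | some c =>
        exfalso
        have hm := get?_mk_mem _ _ _ hv
        simp only [validKeys, List.mem_cons, Prod.mk.injEq, List.not_mem_nil, or_false] at hm
        rcases hm with ⟨rfl,-⟩|⟨rfl,-⟩|⟨rfl,-⟩|⟨rfl,-⟩|⟨rfl,-⟩|⟨rfl,-⟩|⟨rfl,-⟩|⟨rfl,-⟩|⟨rfl,-⟩|⟨rfl,-⟩|
          ⟨rfl,-⟩|⟨rfl,-⟩|⟨rfl,-⟩|⟨rfl,-⟩|⟨rfl,-⟩|⟨rfl,-⟩|⟨rfl,-⟩|⟨rfl,-⟩|⟨rfl,-⟩|⟨rfl,-⟩|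
          ⟨rfl,-⟩|⟨rfl,-⟩|⟨rfl,-⟩|⟨rfl,-⟩|⟨rfl,-⟩|⟨rfl,-⟩|⟨rfl,-⟩|⟨rfl,-⟩|⟨rfl,-⟩|⟨rfl,-⟩|
          ⟨rfl,-⟩|⟨rfl,-⟩|⟨rfl,-⟩|⟨rfl,-⟩|⟨rfl,-⟩|⟨rfl,-⟩|⟨rfl,-⟩|⟨rfl,-⟩|⟨rfl,-⟩|⟨rfl,-⟩|
          ⟨rfl,-⟩|⟨rfl,-⟩|⟨rfl,-⟩|⟨rfl,-⟩|⟨rfl,-⟩|⟨rfl,-⟩|⟨rfl,-⟩|⟨rfl,-⟩|⟨rfl,-⟩|⟨rfl,-⟩|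
          ⟨rfl,-⟩|⟨rfl,-⟩|⟨rfl,-⟩|⟨rfl,-⟩|⟨rfl,-⟩|⟨rfl,-⟩|⟨rfl,-⟩ <;>
          first
            | exact absurd hn (by decide)
            | exact h1 (by decide)
            | exact h2 (by decide)
            | exact h3 (by decide)
            | exact h4 (by decide)

-- ===== VERDICT (by name: the statement is the Claim_ definition above) =====
set_option maxRecDepth 16384 in
set_option maxHeartbeats 2000000 in
theorem key_to_code_spec : Claim_equal_key_to_code := by
  intro t _
  unfold Spec_key_to_code key_to_code key_to_code_alt
  by_cases hd : t ∈ digitsAscii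
  · fin_cases hd <;> decide
  · rw [keyLoopA_lookup t hd validKeys validKeys_nodup, bLookup_eq]
    cases hget : (PySem.Dict.mk validKeys).get? (PySem.Str.replace (PySem.Str.lower t) " " "_") <;>
      simp [hd]
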